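-- pv_equiv track=rewrite | github.com/dantechguy/textwrapper | texttool/texttool.py | get_delimiter_index_list
-- ===== SOURCE A (Python) =====
-- def get_delimiter_index_list(text, delimiters):
-- 	delimiter_index_dictionary = {
-- 		character: []
-- 		for character in delimiters }
--
-- 	for index, character in enumerate(text):
-- 		if character in delimiter_index_dictionary:
-- 			delimiter_index_dictionary[character].append(index)
--
-- 	delimiter_index_list = []
-- 	for character in delimiters:
-- 		delimiter_index_list.extend(delimiter_index_dictionary[character][::-1])
--
-- 	return delimiter_index_list
-- ===== SOURCE B (Python) =====
-- def get_delimiter_index_list(text, delimiters):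
-- 	delimiter_index_list = []
-- 	for character in delimiters:
-- 		for index in range(len(text) - 1, -1, -1):
-- 			if text[index] == character:
-- 				delimiter_index_list.append(index)
-- 	return delimiter_index_list
-- ===== Notes on version B (the rewrite author's own statement) =====
-- stated objective: alternative
-- what changed: Replaced the dictionary-grouping pass plus reversed-slice concatenation by repeated per-delimiter descending scans of the text that emit each delimiter's indices already in reversed order, with no dictionary at all.
import Mathlib
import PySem

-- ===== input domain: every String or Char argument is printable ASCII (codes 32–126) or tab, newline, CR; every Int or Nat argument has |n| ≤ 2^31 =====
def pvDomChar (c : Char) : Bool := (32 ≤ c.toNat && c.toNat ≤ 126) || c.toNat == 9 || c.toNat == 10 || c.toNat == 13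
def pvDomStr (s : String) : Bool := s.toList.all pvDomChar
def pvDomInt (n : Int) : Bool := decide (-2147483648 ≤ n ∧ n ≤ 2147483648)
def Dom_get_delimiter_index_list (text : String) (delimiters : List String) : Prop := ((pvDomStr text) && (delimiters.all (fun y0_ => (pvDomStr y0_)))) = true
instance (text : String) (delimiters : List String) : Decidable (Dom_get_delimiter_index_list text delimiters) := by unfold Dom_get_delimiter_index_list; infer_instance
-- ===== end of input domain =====

-- B replaces A's dictionary grouping by per-delimiter descending index scans (alternative decomposition, same return value).

-- ===== PORT A =====
-- dict comprehension {character: [] for character in delimiters}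
def pvSeedDict (delimiters : List String) : PySem.Dict String (List Int) :=
  delimiters.foldl (fun d c => d.insert c []) PySem.Dict.empty

-- for index, character in enumerate(text): if character in dict: dict[character].append(index)
def pvGroupDict (text : String) (delimiters : List String) : PySem.Dict String (List Int) :=
  (PySem.List.enumerate text.toList).foldl
    (fun d p =>
      if d.contains (String.ofList [p.2]) then
        d.modify (String.ofList [p.2]) [] (fun l => l ++ [p.1])
      else d) (pvSeedDict delimiters)

-- for character in delimiters: result.extend(dict[character][::-1])
def get_delimiter_index_list (text : String) (delimiters : List String) : List Int :=
  delimiters.foldl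
    (fun acc c =>
      acc ++ ((PySem.List.slice? (((pvGroupDict text delimiters).get? c).getD []) none none (-1)).getD [])) []

-- ===== PORT B =====
-- for character in delimiters: for index in range(len(text)-1, -1, -1): if text[index] == character: append(index)
def get_delimiter_index_list_alt (text : String) (delimiters : List String) : List Int :=
  delimiters.foldl
    (fun acc c =>
      (PySem.List.pyRange ((text.toList.length : Int) - 1) (-1) (-1)).foldl
        (fun acc2 i =>
          if String.ofList [PySem.List.pyGetD text.toList i ' '] = c then acc2 ++ [i] else acc2)
        acc) []

-- ===== PRECONDITION & SPEC =====
def Spec_get_delimiter_index_list (text : String) (delimiters : List String) (out : List Int) : Prop := out = get_delimiter_index_list_alt text delimiters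
instance (text : String) (delimiters : List String) (out : List Int) : Decidable (Spec_get_delimiter_index_list text delimiters out) := by unfold Spec_get_delimiter_index_list; infer_instance

-- ===== CLAIM (what is proved, stated in full; the proofs are below) =====
def Claim_equal_get_delimiter_index_list : Prop := ∀ (text : String) (delimiters : List String), Dom_get_delimiter_index_list text delimiters → Spec_get_delimiter_index_list text delimiters (get_delimiter_index_list text delimiters)

-- ===== LEMMAS AND PROOFS =====

-- Every value in the dict-comprehension seed is [].
lemma getD_pvSeedDict (delimiters : List String) (c : String) :
    (pvSeedDict delimiters).getD c [] = [] := by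
  unfold pvSeedDict
  have h : ∀ (l : List String) (d : PySem.Dict String (List Int)),
      (∀ c : String, d.getD c [] = []) → ∀ c : String,
      (l.foldl (fun d c => d.insert c ([] : List Int)) d).getD c [] = [] := by
    intro l
    induction l with
    | nil => intro d h c; exact h c
    | cons x xs ih =>
        intro d h c
        refine ih _ (fun c' => ?_) c
        rw [PySem.Dict.getD_insert]
        split <;> simp [h]
  exact h delimiters PySem.Dict.empty (fun c => by simp) c

-- Every delimiter is a key of the seed dict.
lemma contains_pvSeedDict (delimiters : List String) (c : String) (hc : c ∈ delimiters) :
    (pvSeedDict delimiters).contains c = true := by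
  unfold pvSeedDict
  rw [PySem.Dict.contains_iff_mem_keys, PySem.Dict.keys_foldl_insert]
  exact (PySem.Set.mem_update _ _ _).mpr (Or.inr hc)

-- A's grouping loop, read through getD: it appends the matching indices in text order when the key is present.
lemma getD_groupLoop (l : List (Int × Char)) (d : PySem.Dict String (List Int))
    (c : String) (hc : d.contains c = true) :
    (l.foldl (fun d p =>
        if d.contains (String.ofList [p.2]) then
          d.modify (String.ofList [p.2]) [] (fun l => l ++ [p.1])
        else d) d).getD c []
      = d.getD c [] ++ (l.filter (fun p => String.ofList [p.2] == c)).map (·.1) := by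
  induction l generalizing d with
  | nil => simp
  | cons p l ih =>
      simp only [List.foldl_cons, List.filter_cons]
      by_cases hk : d.contains (String.ofList [p.2]) = true
      · rw [if_pos hk]
        have hc' : (d.modify (String.ofList [p.2]) [] (fun l => l ++ [p.1])).contains c = true := by
          rw [PySem.Dict.contains_modify, hc]; simp
        rw [ih _ hc', PySem.Dict.getD_modify]
        by_cases he : c = String.ofList [p.2]
        · simp [he, List.append_assoc]
        · have hb : (String.ofList [p.2] == c) = false :=
            beq_eq_false_iff_ne.mpr (fun h => he h.symm)
          simp [he, hb]
      · rw [if_neg hk]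
        have hb : (String.ofList [p.2] == c) = false :=
          beq_eq_false_iff_ne.mpr (fun h => hk (h ▸ hc))
        rw [hb, ih _ hc]
        simp

-- A's per-delimiter list after the reversed slice.
lemma portA_body (text : String) (delimiters : List String) (c : String) (hc : c ∈ delimiters) :
    ((PySem.List.slice? (((pvGroupDict text delimiters).get? c).getD []) none none (-1)).getD [])
      = (((PySem.List.enumerate text.toList).filter
          (fun p => String.ofList [p.2] == c)).map (·.1)).reverse := by
  rw [PySem.List.slice?_none_none_neg_one, Option.getD_some]
  congr 1
  rw [← PySem.Dict.getD_eq_get?_getD]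
  unfold pvGroupDict
  rw [getD_groupLoop _ _ _ (contains_pvSeedDict delimiters c hc), getD_pvSeedDict]
  simp

-- B's inner descending scan collects the reversed ascending matches.
lemma portB_body (cs : List Char) (c : String) (acc : List Int) :
    (PySem.List.pyRange ((cs.length : Int) - 1) (-1) (-1)).foldl
        (fun acc2 i =>
          if String.ofList [PySem.List.pyGetD cs i ' '] = c then acc2 ++ [i] else acc2) acc
      = acc ++ (((PySem.List.enumerate cs).filter
          (fun p => String.ofList [p.2] == c)).map (·.1)).reverse := by
  have hr : PySem.List.pyRange ((cs.length : Int) - 1) (-1) (-1)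
      = (PySem.List.pyRange 0 (cs.length : Int) 1).reverse := by
    have h := PySem.List.pyRange_neg_one_eq_reverse ((cs.length : Int) - 1) (-1)
    simpa using h
  have hstep : (fun (acc2 : List Int) (i : Int) =>
      if String.ofList [PySem.List.pyGetD cs i ' '] = c then acc2 ++ [i] else acc2)
      = fun acc2 i =>
        if (fun j => String.ofList [PySem.List.pyGetD cs j ' '] == c) i = true
        then acc2 ++ [(fun j => j) i] else acc2 := by
    funext acc2 i
    by_cases h : String.ofList [PySem.List.pyGetD cs i ' '] = c <;> simp [h]
  rw [hr, hstep, PySem.List.foldl_append_if]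
  congr 1
  rw [List.filter_reverse, List.map_reverse]
  congr 1
  rw [PySem.List.enumerate_eq_map_pyRange cs ' ']
  simp only [List.filter_map, Function.comp_def, List.map_map, PySem.List.len, List.map_id']

-- ===== VERDICT (by name: the statement is the Claim_ definition above) =====
theorem get_delimiter_index_list_spec : Claim_equal_get_delimiter_index_list := by
  intro text delimiters _
  show get_delimiter_index_list text delimiters = get_delimiter_index_list_alt text delimiters
  unfold get_delimiter_index_list get_delimiter_index_list_alt
  apply PySem.List.foldl_congr_mem
  intro acc c hc
  rw [portA_body text delimiters c hc, portB_body text.toList c acc]
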